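-- pv_equiv track=rewrite | github.com/gtatiya/Implicit-Knowledge-Transfer | utils.py | has_all_properties
-- ===== SOURCE A (Python) =====
-- def has_all_properties(objects, properties):
--
--     properties = {p: False for p in properties}
--     for o in objects:
--         for p in properties:
--             if p in o:
--                 properties[p] = True
--
--         if all(value == True for value in properties.values()):
--             return True
--
--     return False
-- ===== SOURCE B (Python) =====
-- def has_all_properties(objects, properties):
--     objects = list(objects)
--     return bool(objects) and all(any(p in o for o in objects) for p in properties)
-- ===== Notes on version B (the rewrite author's own statement) =====
-- stated objective: simpler
-- what changed: Replaces A's stateful found-flag dict with cumulative early-return by a transposed per-property existence test (all/any one-liner) guarded by bool(objects); the short-circuiting any/all avoids A's full flag-dict rescan per object.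
import Mathlib
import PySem

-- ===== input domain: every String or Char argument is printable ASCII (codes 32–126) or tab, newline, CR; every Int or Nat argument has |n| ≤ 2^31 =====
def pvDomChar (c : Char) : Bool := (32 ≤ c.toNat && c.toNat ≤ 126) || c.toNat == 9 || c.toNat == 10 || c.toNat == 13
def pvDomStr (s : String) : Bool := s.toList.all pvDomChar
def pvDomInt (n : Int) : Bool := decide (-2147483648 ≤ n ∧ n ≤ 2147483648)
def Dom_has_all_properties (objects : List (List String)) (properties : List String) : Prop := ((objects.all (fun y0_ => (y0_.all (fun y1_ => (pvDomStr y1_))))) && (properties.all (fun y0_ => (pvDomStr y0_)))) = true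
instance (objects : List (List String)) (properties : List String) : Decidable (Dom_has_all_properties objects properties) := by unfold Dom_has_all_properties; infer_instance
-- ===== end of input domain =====

-- B replaces A's stateful found-flag dict with a per-property existence test (simpler decomposition, same cost).


-- ===== PORT A =====
-- 'for o in objects: …' with the dict of found-flags as loop state; early 'return True'.
def hapLoop (d : PySem.Dict String Bool) (objects : List (List String)) : Bool :=
  match objects with
  | [] => false
  | o :: rest =>
    -- for p in properties: if p in o: properties[p] = True
    let d' := d.keys.foldl (fun acc p => if o.contains p then acc.insert p true else acc) d
    -- if all(value == True for value in properties.values()): return True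
    if d'.values.all (fun v => v == true) then true else hapLoop d' rest

def has_all_properties (objects : List (List String)) (properties : List String) : Bool :=
  -- properties = {p: False for p in properties}
  hapLoop (properties.foldl (fun d p => d.insert p false) PySem.Dict.empty) objects

-- ===== PORT B =====
def has_all_properties_alt (objects : List (List String)) (properties : List String) : Bool :=
  !objects.isEmpty && properties.all (fun p => objects.any (fun o => o.contains p))

-- ===== PRECONDITION & SPEC =====
def Spec_has_all_properties (objects : List (List String)) (properties : List String) (out : Bool) : Prop := out = has_all_properties_alt objects properties
instance (objects : List (List String)) (properties : List String) (out : Bool) : Decidable (Spec_has_all_properties objects properties out) := by unfold Spec_has_all_properties; infer_instance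

-- ===== CLAIM (what is proved, stated in full; the proofs are below) =====
def Claim_equal_has_all_properties : Prop := ∀ (objects : List (List String)) (properties : List String), Dom_has_all_properties objects properties → Spec_has_all_properties objects properties (has_all_properties objects properties)

-- ===== LEMMAS AND PROOFS =====

-- `all` only depends on the function's values on members of the list.
theorem hap_all_congr_mem {α : Type} (l : List α) (f g : α → Bool)
    (h : ∀ x ∈ l, f x = g x) : l.all f = l.all g := by
  induction l with
  | nil => rfl
  | cons x xs ih =>
    simp only [List.all_cons]
    rw [h x (by simp), ih (fun y hy => h y (by simp [hy]))]

-- The inner loop only re-inserts keys already present: keys are unchanged.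
theorem hap_fold_keys (ks : List String) (o : List String) (d : PySem.Dict String Bool)
    (h : ∀ p ∈ ks, d.contains p = true) :
    (ks.foldl (fun acc p => if o.contains p then acc.insert p true else acc) d).keys = d.keys := by
  induction ks generalizing d with
  | nil => rfl
  | cons p rest ih =>
    simp only [List.foldl_cons]
    by_cases hc : o.contains p = true
    · rw [if_pos hc]
      rw [ih (d.insert p true)
        (fun q hq => by rw [PySem.Dict.contains_insert]; simp [h q (by simp [hq])])]
      exact PySem.Dict.keys_insert_of_contains d true (h p (by simp))
    · rw [if_neg hc]
      exact ih d (fun q hq => h q (by simp [hq]))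

-- Value of a key after the inner loop: old value, or True if the object contains it.
theorem hap_fold_getD (ks : List String) (o : List String) (d : PySem.Dict String Bool) (q : String) :
    (ks.foldl (fun acc p => if o.contains p then acc.insert p true else acc) d).getD q false
      = if q ∈ ks ∧ q ∈ o then true else d.getD q false := by
  induction ks generalizing d with
  | nil => simp
  | cons p rest ih =>
    simp only [List.foldl_cons]
    rw [ih]
    have hstep : (if o.contains p then d.insert p true else d).getD q false
        = if q = p ∧ q ∈ o then true else d.getD q false := by
      by_cases hc : p ∈ o
      · rw [if_pos (by simpa using hc), PySem.Dict.getD_insert]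
        by_cases hqp : q = p
        · subst hqp; simp [hc]
        · simp [hqp]
      · rw [if_neg (by simpa using hc)]
        by_cases hqp : q = p
        · subst hqp; simp [hc]
        · simp [hqp]
    rw [hstep]
    by_cases h1 : q ∈ rest <;> by_cases h2 : q = p <;> by_cases h3 : q ∈ o <;>
      simp [h1, h2, h3] <;> tauto

-- Characterisation of A's object loop: found-flag OR appearance in a remaining object, per key.
theorem hapLoop_eq (objects : List (List String)) (d : PySem.Dict String Bool)
    (hnd : d.keys.Nodup) :
    hapLoop d objects
      = (!objects.isEmpty
          && d.keys.all (fun p => d.getD p false || objects.any (fun o => o.contains p))) := by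
  induction objects generalizing d with
  | nil => simp [hapLoop]
  | cons o rest ih =>
    have hcont : ∀ p ∈ d.keys, d.contains p = true :=
      fun p hp => (PySem.Dict.contains_iff_mem_keys d p).2 hp
    rw [hapLoop]
    set d' := d.keys.foldl (fun acc p => if o.contains p then acc.insert p true else acc) d with hd'
    have hkeys : d'.keys = d.keys := hap_fold_keys d.keys o d hcont
    have hget : ∀ q ∈ d.keys, d'.getD q false = (d.getD q false || o.contains q) := by
      intro q hq
      rw [hd', hap_fold_getD]
      by_cases hc : q ∈ o <;> simp [hq, hc]
    have hall : (d'.values.all (fun v => v == true))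
        = d.keys.all (fun p => d.getD p false || o.contains p) := by
      rw [PySem.Dict.values_eq_map_keys d' (hkeys ▸ hnd) false, hkeys, List.all_map]
      exact hap_all_congr_mem _ _ _ (fun p hp => by simp [hget p hp])
    rw [hall]
    by_cases hA : d.keys.all (fun p => d.getD p false || o.contains p) = true
    · rw [if_pos hA]
      simp only [List.isEmpty_cons, Bool.not_false, Bool.true_and]
      symm
      rw [List.all_eq_true] at hA ⊢
      intro p hp
      have := hA p hp
      simp only [List.any_cons]
      rcases Bool.or_eq_true_iff.1 this with h | h
      · simp [h]
      · simp only [List.contains_eq_mem, decide_eq_true_eq] at h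
        simp [h]
    · rw [if_neg hA, ih d' (hkeys ▸ hnd), hkeys]
      have hcong : d.keys.all (fun p => d'.getD p false || rest.any (fun o' => o'.contains p))
          = d.keys.all (fun p => d.getD p false || (o :: rest).any (fun o' => o'.contains p)) :=
        hap_all_congr_mem _ _ _ (fun p hp => by rw [hget p hp]; simp [Bool.or_assoc])
      rw [hcong]
      cases rest with
      | nil =>
        simp only [List.isEmpty_nil, Bool.not_true, Bool.false_and, List.isEmpty_cons,
          Bool.not_false, Bool.true_and]
        symm
        simp only [List.any_cons, List.any_nil, Bool.or_false]
        simpa [Bool.not_eq_true] using hA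
      | cons o2 rest2 => simp

-- The initial dict comprehension maps every key to False.
theorem hap_init_getD (ps : List String) (d : PySem.Dict String Bool)
    (h : ∀ q, d.getD q false = false) (q : String) :
    (ps.foldl (fun d p => d.insert p false) d).getD q false = false := by
  induction ps generalizing d with
  | nil => exact h q
  | cons p rest ih =>
    simp only [List.foldl_cons]
    apply ih
    intro r
    rw [PySem.Dict.getD_insert]
    split <;> simp [h]

-- ===== VERDICT (by name: the statement is the Claim_ definition above) =====
theorem has_all_properties_spec : Claim_equal_has_all_properties := by
  intro objects properties _
  show has_all_properties objects properties = has_all_properties_alt objects properties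
  unfold has_all_properties has_all_properties_alt
  set d0 := properties.foldl (fun d p => d.insert p false) PySem.Dict.empty with hd0
  have hnd : d0.keys.Nodup :=
    PySem.Dict.nodup_keys_foldl_insert properties (fun _ _ => false) PySem.Dict.empty
      PySem.Dict.nodup_keys_empty
  rw [hapLoop_eq objects d0 hnd]
  have hget : ∀ q, d0.getD q false = false :=
    hap_init_getD properties PySem.Dict.empty (fun q => PySem.Dict.getD_empty q false)
  have hmem : ∀ p, p ∈ d0.keys ↔ p ∈ properties := by
    intro p
    rw [hd0, PySem.Dict.keys_foldl_insert properties (fun _ _ => false) PySem.Dict.empty]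
    show p ∈ PySem.Set.update ([] : List String) properties ↔ _
    exact PySem.Set.mem_ofList properties p
  have hkeyall : d0.keys.all (fun p => d0.getD p false || objects.any (fun o => o.contains p))
      = properties.all (fun p => objects.any (fun o => o.contains p)) := by
    simp only [hget, Bool.false_or]
    cases hB : properties.all (fun p => objects.any (fun o => o.contains p)) with
    | true =>
      rw [List.all_eq_true] at hB ⊢
      exact fun p hp => hB p ((hmem p).1 hp)
    | false =>
      rw [Bool.eq_false_iff] at hB ⊢
      intro hAll
      apply hB
      rw [List.all_eq_true] at hAll ⊢
      exact fun p hp => hAll p ((hmem p).2 hp)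
  rw [hkeyall]
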